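-- pv_equiv track=rewrite | github.com/nimirium/snippets | kakuro/kakuro.py | _get_start_index_of_group
-- ===== SOURCE A (Python) =====
-- def _get_start_index_of_group(row, group_number):
--     cur_group_number = 0
--     cur_in_block = True
--     for cell_i, cell in enumerate(row):
--         if cell == 'x':
--             if not cur_in_block:
--                 cur_group_number += 1
--         else:
--             if cur_group_number == group_number:
--                 return cell_i
--             cur_in_block = False
--     raise Exception(f"Could not get_start_index_of_group with row={row}, group_number={group_number}")
-- ===== SOURCE B (Python) =====
-- def _get_start_index_of_group(row, group_number):
--     first_index = {}
--     group = 0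
--     seen_cell = False
--     for i, cell in enumerate(row):
--         if cell == 'x':
--             if seen_cell:
--                 group += 1
--         else:
--             seen_cell = True
--             first_index.setdefault(group, i)
--     if group_number in first_index:
--         return first_index[group_number]
--     raise Exception(f"Could not get_start_index_of_group with row={row}, group_number={group_number}")
-- ===== Notes on version B (the rewrite author's own statement) =====
-- stated objective: alternative
-- what changed: B makes one full pass building a dict mapping each group number to the first index of a non-'x' cell in that group, then answers the query by a single lookup, instead of A's early-returning scan; B raises the identical exception when the group is absent.
import Mathlib
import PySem

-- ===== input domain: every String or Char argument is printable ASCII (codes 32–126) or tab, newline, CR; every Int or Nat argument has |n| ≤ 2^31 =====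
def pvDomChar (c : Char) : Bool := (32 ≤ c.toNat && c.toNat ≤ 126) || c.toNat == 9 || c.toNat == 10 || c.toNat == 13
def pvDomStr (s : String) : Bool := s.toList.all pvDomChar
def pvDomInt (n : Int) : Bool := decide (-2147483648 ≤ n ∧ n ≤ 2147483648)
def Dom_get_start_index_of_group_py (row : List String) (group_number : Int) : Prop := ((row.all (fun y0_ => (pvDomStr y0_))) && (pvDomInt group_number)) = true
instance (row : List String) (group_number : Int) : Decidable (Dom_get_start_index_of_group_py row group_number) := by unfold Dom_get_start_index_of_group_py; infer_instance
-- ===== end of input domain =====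

-- B builds the whole group→first-index table in one pass and then looks the query up,
-- instead of A's early-returning scan; same exception when the group is absent.

-- ===== PORT A =====
-- loop of A: state = (cell_i, cur_group_number, cur_in_block); the final `raise` is
-- outside Pre_ and is rendered as 0.
def aLoop (cells : List String) (cell_i : Int) (cur_group_number : Int)
    (cur_in_block : Bool) (group_number : Int) : Int :=
  match cells with
  | [] => 0  -- Python raises here; excluded by Pre_
  | cell :: rest =>
    if cell == "x" then
      if !cur_in_block then aLoop rest (cell_i + 1) (cur_group_number + 1) cur_in_block group_number
      else aLoop rest (cell_i + 1) cur_group_number cur_in_block group_number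
    else
      if cur_group_number == group_number then cell_i
      else aLoop rest (cell_i + 1) cur_group_number false group_number

def get_start_index_of_group_py (row : List String) (group_number : Int) : Int :=
  aLoop row 0 0 true group_number

-- ===== PORT B =====
-- loop of B: builds first_index : Dict Int Int via setdefault; state = (i, group, seen_cell, dict)
def bLoop (cells : List String) (i : Int) (group : Int) (seen_cell : Bool)
    (first_index : PySem.Dict Int Int) : PySem.Dict Int Int :=
  match cells with
  | [] => first_index
  | cell :: rest =>
    if cell == "x" then
      bLoop rest (i + 1) (if seen_cell then group + 1 else group) seen_cell first_index
    else
      bLoop rest (i + 1) group true (first_index.setdefault group i)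

def get_start_index_of_group_py_alt (row : List String) (group_number : Int) : Int :=
  match (bLoop row 0 0 false PySem.Dict.empty).get? group_number with
  | some v => v
  | none => 0  -- Python raises here; excluded by Pre_

-- ===== PRECONDITION & SPEC =====
-- Pre_ excludes exactly the inputs where A (and B) raise the Exception: there must be a
-- non-'x' cell whose group number (count of 'x' cells after the first non-'x' cell and
-- before it) equals group_number.
def Pre_get_start_index_of_group_py (row : List String) (group_number : Int) : Prop :=
  ∃ i ∈ List.range row.length, row[i]! ≠ "x" ∧
    (((row.take i).countP (· == "x") : Int) - ((row.takeWhile (· == "x")).length : Int)) = group_number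
instance (row : List String) (group_number : Int) : Decidable (Pre_get_start_index_of_group_py row group_number) := by unfold Pre_get_start_index_of_group_py; infer_instance

def pvWitness_get_start_index_of_group_py : List String × Int := (["3", "x", "5"], 1)

def Spec_get_start_index_of_group_py (row : List String) (group_number : Int) (out : Int) : Prop := out = get_start_index_of_group_py_alt row group_number
instance (row : List String) (group_number : Int) (out : Int) : Decidable (Spec_get_start_index_of_group_py row group_number out) := by unfold Spec_get_start_index_of_group_py; infer_instance

-- ===== CLAIM (what is proved, stated in full; the proofs are below) =====
def Claim_equal_get_start_index_of_group_py : Prop := ∀ (row : List String) (group_number : Int), Dom_get_start_index_of_group_py row group_number → Pre_get_start_index_of_group_py row group_number → Spec_get_start_index_of_group_py row group_number (get_start_index_of_group_py row group_number)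

-- ===== LEMMAS AND PROOFS =====

-- bLoop never removes or overwrites an existing entry
theorem bLoop_preserves (cells : List String) (i g : Int) (seen : Bool)
    (d : PySem.Dict Int Int) (k : Int) (v : Int) (h : d.get? k = some v) :
    (bLoop cells i g seen d).get? k = some v := by
  induction cells generalizing i g seen d with
  | nil => simpa [bLoop] using h
  | cons cell rest ih =>
    by_cases hx : (cell == "x") = true
    · rw [show bLoop (cell :: rest) i g seen d
          = bLoop rest (i + 1) (if seen then g + 1 else g) seen d by
            simp [bLoop, hx]]
      exact ih _ _ _ _ h
    · rw [show bLoop (cell :: rest) i g seen d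
          = bLoop rest (i + 1) g true (d.setdefault g i) by simp [bLoop, hx]]
      apply ih
      by_cases hc : d.contains g = true
      · rw [PySem.Dict.setdefault_of_contains (h := hc)]; exact h
      · rw [PySem.Dict.setdefault_of_not_contains (h := by simpa using hc),
            PySem.Dict.get?_insert]
        split_ifs with hk
        · subst hk
          exfalso
          have hco := PySem.Dict.contains_eq_isSome_get? (d := d) (k := k)
          rw [h] at hco
          simp [hco] at hc
        · exact h

-- setdefault of a key other than the query key leaves the query lookup unchanged
theorem get?_setdefault_none (d : PySem.Dict Int Int) (g i gn : Int) (hg : g ≠ gn)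
    (hd : d.get? gn = none) : (d.setdefault g i).get? gn = none := by
  by_cases hc : d.contains g = true
  · rw [PySem.Dict.setdefault_of_contains (h := hc)]; exact hd
  · rw [PySem.Dict.setdefault_of_not_contains (h := by simpa using hc),
        PySem.Dict.get?_insert]
    simp [Ne.symm hg, hd]

-- main invariant: if the query key is not yet in the dict, A's remaining scan equals
-- B's final lookup (with 0 standing for "absent", matching both raise cases)
theorem loop_agree (cells : List String) (i g : Int) (seen : Bool)
    (d : PySem.Dict Int Int) (gn : Int) (hd : d.get? gn = none) :
    (match (bLoop cells i g seen d).get? gn with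
     | some v => v
     | none => 0) = aLoop cells i g (!seen) gn := by
  induction cells generalizing i g seen d with
  | nil => simp [bLoop, aLoop, hd]
  | cons cell rest ih =>
    by_cases hx : (cell == "x") = true
    · rw [show bLoop (cell :: rest) i g seen d
          = bLoop rest (i + 1) (if seen then g + 1 else g) seen d by
            simp [bLoop, hx],
          show aLoop (cell :: rest) i g (!seen) gn
          = aLoop rest (i + 1) (if seen then g + 1 else g) (!seen) gn by
            cases seen <;> simp [aLoop, hx]]
      exact ih _ _ _ _ hd
    · rw [show bLoop (cell :: rest) i g seen d
          = bLoop rest (i + 1) g true (d.setdefault g i) by simp [bLoop, hx]]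
      by_cases hg : g = gn
      · subst hg
        have hnc : d.contains g = false := by
          have hco := PySem.Dict.contains_eq_isSome_get? (d := d) (k := g)
          rw [hd] at hco; simpa using hco
        rw [PySem.Dict.setdefault_of_not_contains (h := hnc)]
        have hv : (bLoop rest (i + 1) g true (d.insert g i)).get? g = some i :=
          bLoop_preserves _ _ _ _ _ _ _ (PySem.Dict.get?_insert_self _ _ _)
        rw [hv]
        simp [aLoop, hx]
      · rw [show aLoop (cell :: rest) i g (!seen) gn
            = aLoop rest (i + 1) g false gn by
              simp [aLoop, hx, show (g == gn) = false by simpa using hg]]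
        exact ih (i + 1) g true _ (get?_setdefault_none d g i gn hg hd)

-- ===== VERDICT (by name: the statement is the Claim_ definition above) =====
theorem get_start_index_of_group_py_spec : Claim_equal_get_start_index_of_group_py := by
  intro row gn _ _
  unfold Spec_get_start_index_of_group_py get_start_index_of_group_py
    get_start_index_of_group_py_alt
  exact (loop_agree row 0 0 false PySem.Dict.empty gn (PySem.Dict.get?_empty gn)).symm
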